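-- pv_equiv track=rewrite | github.com/margaret-matern/data-collection-project | data-collection/scripts/index_filings.py | derive_section_hint
-- ===== SOURCE A (Python) =====
-- from typing import Dict, Iterable, Iterator, List, Optional, Tuple
--
-- def derive_section_hint(sections: List[str]) -> Optional[str]:
--     priority = [
--         "ITEM1A",
--         "ITEM7",
--         "ITEM7A",
--         "ITEM2",
--         "ITEM8",
--         "ITEM9",
--         "ITEM1",
--     ]
--     for candidate in priority:
--         for section in sections:
--             if section.upper().startswith(candidate):
--                 return section
--     return sections[0] if sections else None
-- ===== SOURCE B (Python) =====
-- def derive_section_hint(sections):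
--     priority = [
--         "ITEM1A",
--         "ITEM7",
--         "ITEM7A",
--         "ITEM2",
--         "ITEM8",
--         "ITEM9",
--         "ITEM1",
--     ]
--
--     def rank(section):
--         u = section.upper()
--         for i, candidate in enumerate(priority):
--             if u.startswith(candidate):
--                 return i
--         return len(priority)
--
--     best_rank = len(priority)
--     best = None
--     for section in sections:
--         r = rank(section)
--         if r < best_rank:
--             best_rank = r
--             best = section
--     if best is not None:
--         return best
--     return sections[0] if sections else None
-- ===== Notes on version B (the rewrite author's own statement) =====
-- stated objective: alternative
-- what changed: Replaces A's seven outer scans (one per priority prefix, each rescanning all sections) with a single pass over sections that computes each section's best priority rank and keeps the first section achieving the running minimum rank, falling back to sections[0]/None.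
import Mathlib
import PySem

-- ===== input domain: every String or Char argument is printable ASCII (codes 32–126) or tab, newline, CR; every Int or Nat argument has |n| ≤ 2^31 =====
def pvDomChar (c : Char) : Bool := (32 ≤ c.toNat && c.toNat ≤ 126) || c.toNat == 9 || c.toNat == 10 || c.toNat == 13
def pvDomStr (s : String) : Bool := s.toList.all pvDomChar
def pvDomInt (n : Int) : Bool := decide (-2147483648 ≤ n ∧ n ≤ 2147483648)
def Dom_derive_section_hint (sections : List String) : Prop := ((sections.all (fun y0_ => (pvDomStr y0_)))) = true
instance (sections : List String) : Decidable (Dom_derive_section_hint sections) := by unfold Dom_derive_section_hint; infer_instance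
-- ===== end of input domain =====

-- B replaces A's seven scans over the sections with one pass tracking the best priority rank per section (same result, alternative decomposition).

-- the shared priority list literal
def pvPriority : List String := ["ITEM1A", "ITEM7", "ITEM7A", "ITEM2", "ITEM8", "ITEM9", "ITEM1"]

-- ===== PORT A =====
-- inner 'for section in sections' loop: first section matching the candidate
def pvAInner (candidate : String) : List String → Option String
  | [] => none
  | s :: rest =>
    if PySem.Str.startswith (PySem.Str.upper s) candidate then some s
    else pvAInner candidate rest

-- outer 'for candidate in priority' loop
def pvAOuter (sections : List String) : List String → Option String
  | [] => none
  | c :: cs =>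
    match pvAInner c sections with
    | some s => some s
    | none => pvAOuter sections cs

def derive_section_hint (sections : List String) : Option String :=
  match pvAOuter sections pvPriority with
  | some s => some s
  | none => match sections with
            | [] => none
            | s :: _ => some s      -- sections[0] if sections else None

-- ===== PORT B =====
-- rank(section): 'for i, candidate in enumerate(priority)' — index of first matching candidate, else len(priority)
def pvRankAux (u : String) : List String → Nat
  | [] => 0
  | c :: cs => if PySem.Str.startswith u c then 0 else 1 + pvRankAux u cs

-- the single 'for section in sections' loop with accumulators (best_rank, best)
def pvBLoop : List String → Nat → Option String → Option String
  | [], _, best => best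
  | s :: ss, bestRank, best =>
    let r := pvRankAux (PySem.Str.upper s) pvPriority
    if r < bestRank then pvBLoop ss r (some s) else pvBLoop ss bestRank best

def derive_section_hint_alt (sections : List String) : Option String :=
  match pvBLoop sections pvPriority.length none with
  | some s => some s
  | none => match sections with
            | [] => none
            | s :: _ => some s

-- ===== PRECONDITION & SPEC =====
def Spec_derive_section_hint (sections : List String) (out : Option String) : Prop := out = derive_section_hint_alt sections
instance (sections : List String) (out : Option String) : Decidable (Spec_derive_section_hint sections out) := by unfold Spec_derive_section_hint; infer_instance

-- ===== CLAIM (what is proved, stated in full; the proofs are below) =====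
def Claim_equal_derive_section_hint : Prop := ∀ (sections : List String), Dom_derive_section_hint sections → Spec_derive_section_hint sections (derive_section_hint sections)

-- ===== LEMMAS AND PROOFS =====

-- rank of a section with respect to a priority list P
def pvRnk (P : List String) (s : String) : Nat := pvRankAux (PySem.Str.upper s) P

-- minimum rank over the sections, with default P.length
def pvMin (P ss : List String) : Nat := (ss.map (pvRnk P)).foldr Nat.min P.length

-- common specification both loops are reduced to
def pvSpecG (P ss : List String) : Option String :=
  if pvMin P ss < P.length then ss.find? (fun s => pvRnk P s == pvMin P ss) else none

theorem pvRnk_le (P : List String) (s : String) : pvRnk P s <= P.length := by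
  unfold pvRnk
  induction P with
  | nil => simp [pvRankAux]
  | cons c cs ih => simp only [pvRankAux, List.length_cons]; split <;> omega

theorem foldr_min_le {l : List Nat} {b x : Nat} (hx : x ∈ l) : l.foldr Nat.min b <= x := by
  induction l with
  | nil => cases hx
  | cons a t ih =>
    rcases List.mem_cons.1 hx with rfl | h
    · exact Nat.min_le_left _ _
    · exact le_trans (Nat.min_le_right _ _) (ih h)

theorem foldr_min_succ (l : List Nat) (b : Nat) :
    (l.map (fun x => 1 + x)).foldr Nat.min (1 + b) = 1 + l.foldr Nat.min b := by
  induction l with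
  | nil => rfl
  | cons a t ih =>
    simp only [List.map_cons, List.foldr_cons, ih, Nat.min_def]
    split_ifs <;> omega

theorem find?_congr_mem {α : Type} {p q : α → Bool} {l : List α}
    (h : ∀ x ∈ l, p x = q x) : l.find? p = l.find? q := by
  induction l with
  | nil => rfl
  | cons a t ih =>
    simp only [List.find?_cons, h a (List.mem_cons_self)]
    cases q a
    · exact ih fun x hx => h x (List.mem_cons_of_mem _ hx)
    · rfl

theorem pvAInner_eq_find? (c : String) (ss : List String) :
    pvAInner c ss = ss.find? (fun s => PySem.Str.startswith (PySem.Str.upper s) c) := by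
  induction ss with
  | nil => rfl
  | cons s t ih =>
    simp only [pvAInner, List.find?_cons]
    cases h : PySem.Str.startswith (PySem.Str.upper s) c
    · simp only [ih]; rfl
    · rfl

theorem pvAOuter_eq_spec (P ss : List String) : pvAOuter ss P = pvSpecG P ss := by
  induction P with
  | nil => simp [pvAOuter, pvSpecG]
  | cons c cs ih =>
    have hrnk : ∀ s, pvRnk (c :: cs) s
        = if PySem.Str.startswith (PySem.Str.upper s) c then 0 else 1 + pvRnk cs s := by
      intro s; rfl
    by_cases hex : ∃ s ∈ ss, PySem.Str.startswith (PySem.Str.upper s) c = true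
    · -- some section matches c: the overall minimum rank is 0
      obtain ⟨s₀, hs₀, hm⟩ := hex
      have h0 : pvRnk (c :: cs) s₀ = 0 := by rw [hrnk, if_pos hm]
      have hmin : pvMin (c :: cs) ss = 0 := by
        have := foldr_min_le (l := ss.map (pvRnk (c :: cs))) (b := (c :: cs).length)
          (x := pvRnk (c :: cs) s₀) (List.mem_map_of_mem hs₀)
        unfold pvMin; omega
      have hfind : pvAInner c ss = ss.find? (fun s => pvRnk (c :: cs) s == pvMin (c :: cs) ss) := by
        rw [pvAInner_eq_find?, hmin]
        refine find?_congr_mem fun s _ => ?_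
        rw [hrnk s]
        cases h : PySem.Str.startswith (PySem.Str.upper s) c
        · simp
        · rfl
      have hpos : pvMin (c :: cs) ss < (c :: cs).length := by
        rw [hmin]; simp
      rcases hf : ss.find? (fun s => pvRnk (c :: cs) s == pvMin (c :: cs) ss) with _ | s
      · -- impossible: s₀ satisfies the predicate
        exfalso
        have := List.find?_eq_none.1 hf s₀ hs₀
        rw [h0, hmin] at this
        simp at this
      · simp only [pvAOuter, hfind, hf, pvSpecG, if_pos hpos]
    · -- no section matches c: every rank shifts by one
      push Not at hex
      have hmap : ss.map (pvRnk (c :: cs)) = (ss.map (pvRnk cs)).map (fun x => 1 + x) := by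
        rw [List.map_map]
        refine List.map_congr_left fun s hs => ?_
        rw [hrnk s, if_neg (hex s hs)]
        rfl
      have hmin : pvMin (c :: cs) ss = 1 + pvMin cs ss := by
        unfold pvMin
        rw [hmap, List.length_cons, Nat.add_comm, foldr_min_succ]
      have hnone : pvAInner c ss = none := by
        rw [pvAInner_eq_find?]
        exact List.find?_eq_none.2 fun s hs => by exact hex s hs
      simp only [pvAOuter, hnone, ih, pvSpecG, hmin, List.length_cons]
      by_cases hlt : pvMin cs ss < cs.length
      · rw [if_pos hlt, if_pos (by omega)]
        refine find?_congr_mem fun s hs => ?_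
        rw [hrnk s, if_neg (hex s hs)]
        by_cases he : pvRnk cs s = pvMin cs ss
        · simp [he]
        · simp [he]
      · rw [if_neg hlt, if_neg (by omega)]

theorem pvBLoop_eq_spec (ss : List String) : ∀ (br : Nat) (bs : Option String), br <= pvPriority.length →
    pvBLoop ss br bs
      = if pvMin pvPriority ss < br
        then ss.find? (fun s => pvRnk pvPriority s == pvMin pvPriority ss)
        else bs := by
  induction ss with
  | nil =>
    intro br bs hbr
    have h : ¬ pvMin pvPriority [] < br := by
      unfold pvMin; simp only [List.map_nil, List.foldr_nil]; omega
    simp only [pvBLoop, if_neg h]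
  | cons s t ih =>
    intro br bs hbr
    have hrle : pvRnk pvPriority s <= pvPriority.length := pvRnk_le _ _
    have hmin : pvMin pvPriority (s :: t) = Nat.min (pvRnk pvPriority s) (pvMin pvPriority t) := rfl
    have hr : pvRankAux (PySem.Str.upper s) pvPriority = pvRnk pvPriority s := rfl
    simp only [pvBLoop, hr]
    by_cases hlt : pvRnk pvPriority s < br
    · rw [if_pos hlt, ih _ _ (le_of_lt (lt_of_lt_of_le hlt hbr))]
      by_cases h2 : pvMin pvPriority t < pvRnk pvPriority s
      · have hm2 : pvMin pvPriority (s :: t) = pvMin pvPriority t := by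
          rw [hmin]; exact Nat.min_eq_right (le_of_lt h2)
        rw [if_pos h2, hm2, if_pos (lt_trans h2 hlt), List.find?_cons]
        have hb : (pvRnk pvPriority s == pvMin pvPriority t) = false := by
          simp only [beq_eq_false_iff_ne, ne_eq]; omega
        rw [hb]
      · have hm2 : pvMin pvPriority (s :: t) = pvRnk pvPriority s := by
          rw [hmin]; exact Nat.min_eq_left (Nat.le_of_not_lt h2)
        rw [if_neg h2, hm2, if_pos hlt, List.find?_cons]
        have hb : (pvRnk pvPriority s == pvRnk pvPriority s) = true := by simp
        rw [hb]
    · rw [if_neg hlt, ih _ _ hbr]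
      by_cases h2 : pvMin pvPriority t < br
      · have hm2 : pvMin pvPriority (s :: t) = pvMin pvPriority t := by
          rw [hmin]
          exact Nat.min_eq_right (le_of_lt (lt_of_lt_of_le h2 (Nat.le_of_not_lt hlt)))
        rw [if_pos h2, hm2, if_pos h2, List.find?_cons]
        have hb : (pvRnk pvPriority s == pvMin pvPriority t) = false := by
          simp only [beq_eq_false_iff_ne, ne_eq]; omega
        rw [hb]
      · have hm2 : ¬ pvMin pvPriority (s :: t) < br := by
          rcases Nat.le_total (pvRnk pvPriority s) (pvMin pvPriority t) with h | h
          · have hq : pvMin pvPriority (s :: t) = pvRnk pvPriority s := by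
              rw [hmin]; exact Nat.min_eq_left h
            rw [hq]; exact hlt
          · have hq : pvMin pvPriority (s :: t) = pvMin pvPriority t := by
              rw [hmin]; exact Nat.min_eq_right h
            rw [hq]; exact h2
        rw [if_neg h2, if_neg hm2]

-- ===== VERDICT (by name: the statement is the Claim_ definition above) =====
theorem derive_section_hint_spec : Claim_equal_derive_section_hint := by
  intro sections _
  unfold Spec_derive_section_hint derive_section_hint derive_section_hint_alt
  rw [pvBLoop_eq_spec sections pvPriority.length none (le_refl _),
      pvAOuter_eq_spec pvPriority sections]
  rfl
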